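-- pv_equiv track=rewrite | github.com/limce21/CODING-TEST | 프로그래머스/lv3/12938. 최고의 집합/최고의 집합.py | solution
-- ===== SOURCE A (Python) =====
-- def solution(n, s):
--     answer = []
--     if s // n <= 0: return [-1]
--     answer = [s//n for _ in range(n)]
--     if s % n != 0:
--         for i in range(s%n):
--             answer[i] +=1
--
--     answer.sort()
--     return answer
-- ===== SOURCE B (Python) =====
-- def solution(n, s):
--     if s // n <= 0: return [-1]
--     out = []
--     k, rem = n, s
--     while k > 0:
--         v = rem // k
--         out.append(v)
--         rem -= v
--         k -= 1
--     return out
-- ===== Notes on version B (the rewrite author's own statement) =====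
-- stated objective: alternative
-- what changed: Replaces the fill-list / increment-a-prefix / sort pipeline with a greedy water-filling loop: repeatedly emit floor(rem/k) for the k values still to place and subtract it, which produces the ascending answer directly with no sort and no block arithmetic.
import Mathlib
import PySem

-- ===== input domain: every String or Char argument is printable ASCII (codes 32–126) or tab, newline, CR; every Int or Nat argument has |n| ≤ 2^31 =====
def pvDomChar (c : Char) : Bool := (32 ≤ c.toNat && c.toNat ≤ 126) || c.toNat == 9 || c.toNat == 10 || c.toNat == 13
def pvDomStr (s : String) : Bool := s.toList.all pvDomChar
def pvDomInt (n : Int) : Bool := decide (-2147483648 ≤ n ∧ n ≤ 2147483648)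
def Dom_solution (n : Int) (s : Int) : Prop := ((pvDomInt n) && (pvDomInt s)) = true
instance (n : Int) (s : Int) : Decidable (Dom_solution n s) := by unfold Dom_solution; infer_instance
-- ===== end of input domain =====

-- B replaces A's fill/increment-prefix/sort pipeline with a greedy water-filling loop
-- (emit rem // k for the k values still to place, subtract, repeat); proved equal on n ≠ 0.

-- ===== PORT A =====
def solution (n : Int) (s : Int) : List Int :=
  if PySem.Int.floordiv s n ≤ 0 then [-1]
  else
    let answer := (PySem.List.pyRange 0 n 1).map (fun _ => PySem.Int.floordiv s n)
    let answer :=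
      if PySem.Int.mod s n ≠ 0 then
        (PySem.List.pyRange 0 (PySem.Int.mod s n) 1).foldl
          (fun acc i => acc.set i.toNat (acc.getD i.toNat 0 + 1)) answer
      else answer
    PySem.List.sorted answer (fun x => x) false

-- ===== PORT B =====
-- the while loop of Source B: k counts down (k iterations when k = n.toNat), rem shrinks by v
def fillGo : Nat → Int → List Int
  | 0, _ => []
  | m + 1, rem =>
    let v := PySem.Int.floordiv rem ((m : Int) + 1)
    v :: fillGo m (rem - v)

def solution_alt (n : Int) (s : Int) : List Int :=
  if PySem.Int.floordiv s n ≤ 0 then [-1]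
  else fillGo n.toNat s

-- ===== PRECONDITION & SPEC =====
-- Pre_ excludes exactly n = 0, where the Python A raises ZeroDivisionError.
def Pre_solution (n : Int) (s : Int) : Prop := n ≠ 0
instance (n : Int) (s : Int) : Decidable (Pre_solution n s) := by unfold Pre_solution; infer_instance
def pvWitness_solution : Int × Int := (3, 14)

def Spec_solution (n : Int) (s : Int) (out : List Int) : Prop := out = solution_alt n s
instance (n : Int) (s : Int) (out : List Int) : Decidable (Spec_solution n s out) := by unfold Spec_solution; infer_instance

-- ===== CLAIM (what is proved, stated in full; the proofs are below) =====
def Claim_equal_solution : Prop := ∀ (n : Int) (s : Int), Dom_solution n s → Pre_solution n s → Spec_solution n s (solution n s)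

-- ===== LEMMAS AND PROOFS =====

-- A's increment loop turns the first k entries of replicate N q into q+1.
lemma incr_loop (q : Int) : ∀ (k N : Nat), k ≤ N →
    (List.range k).foldl (fun acc j => acc.set j (acc.getD j 0 + 1)) (List.replicate N q)
      = List.replicate k (q + 1) ++ List.replicate (N - k) q := by
  intro k
  induction k with
  | zero => intro N _; simp
  | succ k ih =>
    intro N h
    rw [List.range_succ, List.foldl_append, ih N (by omega)]
    simp only [List.foldl]
    have hgd : (List.replicate k (q + 1) ++ List.replicate (N - k) q).getD k 0 = q := by
      rw [List.getD_eq_getElem?_getD, List.getElem?_append_right (by simp)]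
      simp only [List.length_replicate, Nat.sub_self, List.getElem?_replicate]
      have : 0 < N - k := by omega
      simp [this]
    rw [hgd]
    have hNk : N - k = (N - (k + 1)) + 1 := by omega
    rw [List.set_append_right _ _ (by simp), hNk]
    simp only [List.length_replicate, Nat.sub_self, List.replicate_succ, List.set_cons_zero]
    rw [List.append_cons, ← List.replicate_succ', List.replicate_succ, List.cons_append]

-- B's greedy loop on q*k + r (0 ≤ r < k) produces the two sorted blocks directly.
lemma fillGo_eq : ∀ (k : Nat) (q r : Int), 0 ≤ r → r < k →
    fillGo k (q * k + r) = List.replicate (k - r.toNat) q ++ List.replicate r.toNat (q + 1) := by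
  intro k
  induction k with
  | zero => intro q r h0 h1; exfalso; exact absurd (h0.trans_lt h1) (by norm_num)
  | succ m ih =>
    intro q r h0 h1
    have hv : PySem.Int.floordiv (q * (m + 1 : Nat) + r) ((m : Int) + 1) = q := by
      rw [PySem.Int.floordiv_eq_iff_of_pos (by positivity : (0:Int) < (m:Int)+1)]
      have h1' : r < (m : Int) + 1 := by exact_mod_cast h1
      push_cast
      constructor <;> nlinarith
    show (PySem.Int.floordiv (q * (m + 1 : Nat) + r) ((m : Int) + 1)) ::
        fillGo m (q * (m + 1 : Nat) + r - PySem.Int.floordiv (q * (m + 1 : Nat) + r) ((m : Int) + 1))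
      = _
    rw [hv]
    have hrem : q * ((m + 1 : Nat) : Int) + r - q = q * m + r := by push_cast; ring
    rw [hrem]
    by_cases hr : r < m
    · rw [ih q r h0 (by exact_mod_cast hr)]
      have hk : m + 1 - r.toNat = (m - r.toNat) + 1 := by omega
      rw [hk, List.replicate_succ, List.cons_append]
    · -- r = m (since r < m+1)
      have hrm : r = m := by omega
      have hrt : r.toNat = m := by omega
      subst hrm
      rcases Nat.eq_zero_or_pos m with hm | hm
      · subst hm; simp [fillGo]
      · have : q * (m : Int) + m = (q + 1) * m + 0 := by ring
        rw [this, ih (q + 1) 0 le_rfl (by exact_mod_cast hm)]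
        simp [hrt]

theorem solution_spec : Claim_equal_solution := by
  intro n s _ hn
  unfold Spec_solution solution solution_alt
  by_cases hq : PySem.Int.floordiv s n ≤ 0
  · simp [hq]
  · simp only [hq, if_false]
    set q := PySem.Int.floordiv s n with hqdef
    set r := PySem.Int.mod s n with hrdef
    rcases lt_or_gt_of_ne hn with hneg | hpos
    · -- n < 0 : every list in sight is empty
      have hr : n < r ∧ r ≤ 0 := PySem.Int.mod_neg_bounds s hneg
      have h1 : PySem.List.pyRange 0 n 1 = [] := PySem.List.pyRange_one_eq_nil (by omega)
      have h2 : PySem.List.pyRange 0 r 1 = [] := PySem.List.pyRange_one_eq_nil (by omega)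
      have h3 : n.toNat = 0 := by omega
      by_cases hr0 : r = 0 <;>
        simp [h1, h2, h3, hr0, PySem.List.sorted, fillGo]
    · -- n > 0 : both sides are the two sorted blocks
      have hrlo : 0 ≤ r := PySem.Int.mod_nonneg s hpos
      have hrhi : r < n := PySem.Int.mod_lt s hpos
      have hsum : q * n + r = s := PySem.Int.floordiv_mul_add_mod s n
      have hmap : (PySem.List.pyRange 0 n 1).map (fun _ => q) = List.replicate n.toNat q := by
        rw [PySem.List.pyRange_one, List.map_map]
        simp [Function.comp_def, List.map_const']
      -- B's side
      have hB : fillGo n.toNat s =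
          List.replicate (n.toNat - r.toNat) q ++ List.replicate r.toNat (q + 1) := by
        have hn' : ((n.toNat : Int)) = n := by omega
        rw [← hsum, ← hn']
        exact fillGo_eq n.toNat q r hrlo (by omega)
      rw [hB]
      -- A's side
      have hfold : ∀ (k : Nat), k ≤ n.toNat →
          (PySem.List.pyRange 0 (k : Int) 1).foldl
              (fun acc i => acc.set i.toNat (acc.getD i.toNat 0 + 1)) (List.replicate n.toNat q)
            = List.replicate k (q + 1) ++ List.replicate (n.toNat - k) q := by
        intro k hk
        have hpr : PySem.List.pyRange 0 (k : Int) 1 = (List.range k).map Int.ofNat := by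
          rw [PySem.List.pyRange_one]
          simp only [sub_zero, zero_add, Int.toNat_natCast]
          rfl
        rw [hpr, List.foldl_map]
        exact incr_loop q k n.toNat hk
      have hperm : (List.replicate (n.toNat - r.toNat) q ++ List.replicate r.toNat (q + 1)).Perm
          (List.replicate r.toNat (q + 1) ++ List.replicate (n.toNat - r.toNat) q) :=
        List.perm_append_comm
      have hpw : (List.replicate (n.toNat - r.toNat) q ++ List.replicate r.toNat (q + 1)).Pairwise (· ≤ ·) := by
        apply List.pairwise_append.2
        refine ⟨List.pairwise_replicate.2 (Or.inr le_rfl),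
                List.pairwise_replicate.2 (Or.inr le_rfl), ?_⟩
        intro a ha b hb
        rw [List.eq_of_mem_replicate ha, List.eq_of_mem_replicate hb]; omega
      by_cases hr0 : r = 0
      · simp only [hr0, ne_eq, not_true_eq_false, if_false, hmap, Int.toNat_zero,
          List.replicate_zero, List.append_nil, Nat.sub_zero]
        exact PySem.List.sorted_id_eq_of_perm_of_pairwise _ _ (List.Perm.refl _)
          (List.pairwise_replicate.2 (Or.inr le_rfl))
      · simp only [hr0, ne_eq, not_false_eq_true, if_true, hmap]
        have hrk : r = ((r.toNat : Int)) := by omega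
        conv_lhs => rw [hrk]
        rw [hfold r.toNat (by omega)]
        exact PySem.List.sorted_id_eq_of_perm_of_pairwise _ _ hperm hpw
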